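-- pv_equiv track=rewrite | github.com/ahrtz/study | 코로나 기간 알고/프로그래머스/예산.py | solution
-- ===== SOURCE A (Python) =====
-- def solution(budgets, M):
--     left=0
--     right = max(budgets)
--     ans=0
--     while left<=right:
--         mid = (left+right)//2
--         tmp=0
--         for bud in budgets:
--             if bud<=mid:
--                 tmp+=bud
--             else:
--                 tmp+=mid
--         if tmp<=M:
--             left = mid+1
--             ans=mid
--         else:
--             right=mid-1
--
--
--     return ans
-- ===== SOURCE B (Python) =====
-- def solution(budgets, M):
--     bs = sorted(budgets)
--     n = len(bs)
--     pref = 0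
--     for i, b in enumerate(bs):
--         k = n - i
--         if pref + k * b > M:
--             t = (M - pref) // k
--             return t if t > 0 else 0
--         pref += b
--     return max(bs[-1], 0)
-- ===== Notes on version B (the rewrite author's own statement) =====
-- stated objective: faster
-- what changed: Replaces A's binary search over the cap value (each probe re-summing all budgets) by sorting the budgets once and scanning them with a running prefix sum, solving for the cap analytically with a single floor division at the first index whose capped total exceeds M.
import Mathlib
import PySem

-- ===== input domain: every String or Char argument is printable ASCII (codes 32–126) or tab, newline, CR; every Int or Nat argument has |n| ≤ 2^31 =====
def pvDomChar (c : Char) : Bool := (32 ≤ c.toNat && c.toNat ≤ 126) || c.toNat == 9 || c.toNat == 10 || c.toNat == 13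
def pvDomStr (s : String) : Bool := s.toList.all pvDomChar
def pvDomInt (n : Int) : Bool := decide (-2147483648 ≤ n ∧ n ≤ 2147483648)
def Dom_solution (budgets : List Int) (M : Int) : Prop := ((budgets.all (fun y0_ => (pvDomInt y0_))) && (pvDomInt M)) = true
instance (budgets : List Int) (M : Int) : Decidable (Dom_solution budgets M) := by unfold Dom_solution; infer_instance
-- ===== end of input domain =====

-- B replaces A's binary search over the cap (re-summing all budgets each probe) by
-- sort + one prefix-sum scan that solves for the cap analytically with one floor division.

-- ===== PORT A =====
-- A's inner for-loop: tmp = Σ (bud if bud<=mid else mid)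
def sumCap (budgets : List Int) (mid : Int) : Int :=
  budgets.foldl (fun tmp bud => if bud ≤ mid then tmp + bud else tmp + mid) 0

-- A's while-loop (binary search on the cap)
def aLoop (budgets : List Int) (M left right ans : Int) : Int :=
  if _h : left ≤ right then
    let mid := PySem.Int.floordiv (left + right) 2
    if sumCap budgets mid ≤ M then aLoop budgets M (mid + 1) right mid
    else aLoop budgets M left (mid - 1) ans
  else ans
termination_by (right + 1 - left).toNat
decreasing_by
  · have := PySem.Int.floordiv_two_mid_bounds _h; omega
  · have := PySem.Int.floordiv_two_mid_bounds _h; omega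

def solution (budgets : List Int) (M : Int) : Int :=
  match PySem.List.max? budgets (fun x => x) with
  | none => 0      -- Python raises ValueError on max([]) here; excluded by Pre_solution
  | some mx => aLoop budgets M 0 mx 0

-- ===== PORT B =====
-- B's for-loop over the sorted list: i, running prefix sum, early return at the first
-- index whose capped total exceeds M
def bGo (M n : Int) : List Int → Int → Int → Option Int
  | [], _, _ => none
  | b :: rest, i, pref =>
    if M < pref + (n - i) * b then
      some (let t := PySem.Int.floordiv (M - pref) (n - i); if 0 < t then t else 0)
    else bGo M n rest (i + 1) (pref + b)

def solution_alt (budgets : List Int) (M : Int) : Int :=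
  let bs := PySem.List.sorted budgets (fun x => x) false
  match bGo M (bs.length : Int) bs 0 0 with
  | some r => r
  | none => max ((PySem.List.pyGet? bs (-1)).getD 0) 0   -- bs[-1] raises IndexError on []; excluded by Pre_solution

-- ===== PRECONDITION & SPEC =====
-- Pre_ excludes only the empty list, on which A raises ValueError (max of empty sequence).
def Pre_solution (budgets : List Int) (M : Int) : Prop := budgets ≠ []
instance (budgets : List Int) (M : Int) : Decidable (Pre_solution budgets M) := by
  unfold Pre_solution; infer_instance
def pvWitness_solution : List Int × Int := ([1, 2, 3], 4)
def Spec_solution (budgets : List Int) (M : Int) (out : Int) : Prop := out = solution_alt budgets M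
instance (budgets : List Int) (M : Int) (out : Int) : Decidable (Spec_solution budgets M out) := by
  unfold Spec_solution; infer_instance

-- ===== CLAIM (what is proved, stated in full; the proofs are below) =====
def Claim_equal_solution : Prop := ∀ (budgets : List Int) (M : Int), Dom_solution budgets M → Pre_solution budgets M → Spec_solution budgets M (solution budgets M)

-- ===== LEMMAS AND PROOFS =====

-- sumCap as a sum of clamped values
theorem sumCap_foldl_acc (budgets : List Int) (c a : Int) :
    budgets.foldl (fun tmp bud => if bud ≤ c then tmp + bud else tmp + c) a
      = a + (budgets.map (fun b => min b c)).sum := by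
  induction budgets generalizing a with
  | nil => simp
  | cons b t ih =>
    simp only [List.foldl_cons, List.map_cons, List.sum_cons, ih]
    split <;> simp [min_def] <;> omega

theorem sumCap_eq_sum (budgets : List Int) (c : Int) :
    sumCap budgets c = (budgets.map (fun b => min b c)).sum := by
  simpa using sumCap_foldl_acc budgets c 0

theorem sumCap_mono (budgets : List Int) {c c' : Int} (h : c ≤ c') :
    sumCap budgets c ≤ sumCap budgets c' := by
  rw [sumCap_eq_sum, sumCap_eq_sum]
  apply List.sum_le_sum
  intro b _
  exact le_min (min_le_left _ _) (le_trans (min_le_right _ _) h)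

theorem sumCap_perm {xs ys : List Int} (h : xs.Perm ys) (c : Int) :
    sumCap xs c = sumCap ys c := by
  rw [sumCap_eq_sum, sumCap_eq_sum]
  exact (h.map _).sum_eq

theorem sumCap_split (done rest : List Int) (c : Int)
    (h1 : ∀ x ∈ done, x ≤ c) (h2 : ∀ x ∈ rest, c ≤ x) :
    sumCap (done ++ rest) c = done.sum + (rest.length : Int) * c := by
  rw [sumCap_eq_sum, List.map_append, List.sum_append]
  have e1 : (done.map (fun b => min b c)) = done := by
    conv_rhs => rw [← List.map_id done]
    exact List.map_congr_left (fun x hx => min_eq_left (h1 x hx))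
  have e2 : (rest.map (fun b => min b c)).sum = (rest.length : Int) * c := by
    induction rest with
    | nil => simp
    | cons y t ih =>
      simp only [List.map_cons, List.sum_cons, List.length_cons]
      rw [min_eq_right (h2 y (by simp)), ih (fun x hx => h2 x (by simp [hx]))]
      push_cast; ring
  rw [e1, e2]

-- linear reference scan for A's binary search
def gl (budgets : List Int) (M l a r : Int) : Int :=
  if l ≤ r then
    (if sumCap budgets r ≤ M then r else gl budgets M l a (r - 1))
  else a
termination_by (r + 1 - l).toNat
decreasing_by omega

theorem gl_lower (budgets : List Int) (M l a m : Int)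
    (hm : sumCap budgets m ≤ M) (hl : l ≤ m) :
    ∀ (n : Nat) (r : Int), (r - m).toNat = n → m ≤ r →
      gl budgets M (m + 1) m r = gl budgets M l a r := by
  intro n
  induction n with
  | zero =>
    intro r hn hr
    have hrm : r = m := by omega
    conv_lhs => rw [gl]
    conv_rhs => rw [gl]
    rw [if_neg (by omega), if_pos (by omega), if_pos (hrm ▸ hm), hrm]
  | succ k ih =>
    intro r hn hr
    have hmr : m + 1 ≤ r := by omega
    conv_lhs => rw [gl]
    conv_rhs => rw [gl]
    rw [if_pos hmr, if_pos (by omega : l ≤ r)]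
    by_cases hc : sumCap budgets r ≤ M
    · rw [if_pos hc, if_pos hc]
    · rw [if_neg hc, if_neg hc]
      exact ih (r - 1) (by omega) (by omega)

theorem gl_drop (budgets : List Int) (M l a m : Int)
    (hm : M < sumCap budgets m) :
    ∀ (n : Nat) (r : Int), (r - m + 1).toNat = n → m - 1 ≤ r →
      gl budgets M l a r = gl budgets M l a (m - 1) := by
  intro n
  induction n with
  | zero =>
    intro r hn hr
    rw [show r = m - 1 by omega]
  | succ k ih =>
    intro r hn hr
    have hmr : m ≤ r := by omega
    by_cases hlr : l ≤ r
    · conv_lhs => rw [gl]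
      have hnc : ¬ sumCap budgets r ≤ M := by
        have hmono := sumCap_mono budgets hmr
        omega
      rw [if_pos hlr, if_neg hnc]
      exact ih (r - 1) (by omega) (by omega)
    · conv_lhs => rw [gl]
      conv_rhs => rw [gl]
      rw [if_neg hlr, if_neg (by omega : ¬ l ≤ m - 1)]

theorem aLoop_eq_gl (budgets : List Int) (M : Int) :
    ∀ (n : Nat) (l r a : Int), (r + 1 - l).toNat = n →
      aLoop budgets M l r a = gl budgets M l a r := by
  intro n
  induction n using Nat.strong_induction_on with
  | _ n ih =>
    intro l r a hn
    by_cases hlr : l ≤ r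
    · rw [aLoop]
      simp only [hlr, dif_pos]
      have hmid := PySem.Int.floordiv_two_mid_bounds hlr
      set mid := PySem.Int.floordiv (l + r) 2 with hmiddef
      by_cases hcap : sumCap budgets mid ≤ M
      · simp only [hcap, if_true]
        rw [ih ((r + 1 - (mid + 1)).toNat) (by omega) (mid + 1) r mid rfl]
        exact gl_lower budgets M l a mid hcap hmid.1 (r - mid).toNat r rfl hmid.2
      · simp only [hcap, if_false]
        rw [ih ((mid - 1 + 1 - l).toNat) (by omega) l (mid - 1) a rfl]
        exact (gl_drop budgets M l a mid (by omega) (r - mid + 1).toNat r rfl (by omega)).symm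
    · rw [aLoop, gl]; simp [hlr]

-- the common characterisation of both results
def Chr (budgets : List Int) (M mx R : Int) : Prop :=
  0 ≤ R ∧ R ≤ max mx 0 ∧ (R = 0 ∨ sumCap budgets R ≤ M) ∧
    ∀ c, R < c → c ≤ mx → M < sumCap budgets c

theorem Chr_unique {budgets : List Int} {M mx R1 R2 : Int}
    (h1 : Chr budgets M mx R1) (h2 : Chr budgets M mx R2) : R1 = R2 := by
  obtain ⟨p1, q1, d1, f1⟩ := h1
  obtain ⟨p2, q2, d2, f2⟩ := h2
  by_contra hne
  rcases lt_or_gt_of_ne hne with h | h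
  · have hR2 : 1 ≤ R2 := by omega
    have hs : sumCap budgets R2 ≤ M := by rcases d2 with h' | h' <;> omega
    have hmx : R2 ≤ mx := by
      by_cases h' : 0 ≤ mx
      · rwa [max_eq_left h'] at q2
      · rw [max_eq_right (by omega : mx ≤ 0)] at q2; omega
    have := f1 R2 h hmx; omega
  · have hR1 : 1 ≤ R1 := by omega
    have hs : sumCap budgets R1 ≤ M := by rcases d1 with h' | h' <;> omega
    have hmx : R1 ≤ mx := by
      by_cases h' : 0 ≤ mx
      · rwa [max_eq_left h'] at q1
      · rw [max_eq_right (by omega : mx ≤ 0)] at q1; omega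
    have := f2 R1 h hmx; omega

-- the A side satisfies Chr
theorem gl_char (budgets : List Int) (M : Int) :
    ∀ (n : Nat) (r : Int), (r + 1).toNat = n →
      Chr budgets M r (gl budgets M 0 0 r) := by
  intro n
  induction n using Nat.strong_induction_on with
  | _ n ih =>
    intro r hn
    by_cases h0 : (0 : Int) ≤ r
    · rw [gl]
      simp only [h0, if_true]
      by_cases hcap : sumCap budgets r ≤ M
      · simp only [hcap, if_true]
        exact ⟨h0, le_max_left r 0, Or.inr hcap, fun c hc hc' => by omega⟩
      · simp only [hcap, if_false]
        obtain ⟨p, q, d, f⟩ := ih (r - 1 + 1).toNat (by omega) (r - 1) rfl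
        refine ⟨p, le_trans q (max_le_max (by omega) le_rfl), d, fun c hc hc' => ?_⟩
        by_cases h' : c < r
        · exact f c hc (by omega)
        · have hrc : r = c := by omega
          subst hrc; omega
    · rw [gl]
      simp only [show ¬ (0:Int) ≤ r by omega, if_false]
      exact ⟨le_refl 0, le_max_right r 0, Or.inl rfl, fun c hc hc' => by omega⟩

-- the B side satisfies Chr
theorem sorted_le_getElem {bs : List Int} (hs : bs.Pairwise (· ≤ ·)) :
    ∀ (p q : Nat) (hp : p ≤ q) (hq : q < bs.length), bs[p]'(by omega) ≤ bs[q] := by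
  intro p q hp hq
  rcases Nat.eq_or_lt_of_le hp with h | h
  · subst h; exact le_refl _
  · exact (List.pairwise_iff_getElem.1 hs) p q (by omega) hq h

theorem sorted_le_last {bs : List Int} (hs : bs.Pairwise (· ≤ ·)) (hne : bs ≠ []) :
    ∀ y ∈ bs, y ≤ bs.getLast hne := by
  intro y hy
  obtain ⟨p, hp, hpeq⟩ := List.mem_iff_getElem.1 hy
  rw [List.getLast_eq_getElem]
  exact hpeq ▸ sorted_le_getElem hs p (bs.length - 1) (by omega) (by omega)

theorem bGo_spec (bs : List Int) (M mx : Int)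
    (hs : bs.Pairwise (· ≤ ·)) (hmx : ∀ y ∈ bs, y ≤ mx) :
    ∀ (rest done : List Int), bs = done ++ rest →
      (∀ y ∈ done, sumCap bs y ≤ M) →
      (∀ R, bGo M (bs.length : Int) rest (done.length : Int) done.sum = some R →
        Chr bs M mx R) ∧
      (bGo M (bs.length : Int) rest (done.length : Int) done.sum = none →
        ∀ y ∈ bs, sumCap bs y ≤ M) := by
  intro rest
  induction rest with
  | nil =>
    intro done hsplit hinv
    constructor
    · intro R hR; simp [bGo] at hR
    · intro _ y hy
      exact hinv y (by simpa [hsplit] using hy)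
  | cons b rest' ih =>
    intro done hsplit hinv
    have hlen : (bs.length : Int) - (done.length : Int) = ((b :: rest').length : Int) := by
      rw [hsplit]; push_cast [List.length_append]; ring
    have hdone_le_b : ∀ x ∈ done, x ≤ b := by
      intro x hx
      have := hsplit ▸ hs
      exact (List.pairwise_append.1 this).2.2 x hx b (by simp)
    have hb_le_rest : ∀ x ∈ b :: rest', b ≤ x := by
      intro x hx
      rcases List.mem_cons.1 hx with h | h
      · omega
      · have := hsplit ▸ hs
        exact List.rel_of_pairwise_cons ((List.pairwise_append.1 this).2.1) h
    have hb_mem : b ∈ bs := by rw [hsplit]; simp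
    have hkpos : (0 : Int) < ((b :: rest').length : Int) := by simp
    have hsum_at : ∀ c, (∀ x ∈ done, x ≤ c) → (∀ x ∈ b :: rest', c ≤ x) →
        sumCap bs c = done.sum + ((b :: rest').length : Int) * c := by
      intro c h1 h2; rw [hsplit]; exact sumCap_split done (b :: rest') c h1 h2
    rw [bGo]
    by_cases htrig : M < done.sum + ((bs.length : Int) - (done.length : Int)) * b
    · simp only [htrig, if_true]
      constructor
      · intro R hR
        set k : Int := ((b :: rest').length : Int) with hk
        set t : Int := PySem.Int.floordiv (M - done.sum) k with ht
        have hRval : R = if 0 < t then t else 0 := by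
          rw [hlen] at hR
          simpa [← ht] using hR.symm
        have htrig' : M - done.sum < b * k := by
          rw [hlen] at htrig
          have hcm := mul_comm k b
          omega
        -- t < b
        have htb : t < b := by
          rw [ht]
          exact (PySem.Int.floordiv_lt_iff_lt_mul hkpos).2 htrig'
        -- every element of done is ≤ t
        have hdone_le_t : ∀ x ∈ done, x ≤ t := by
          intro x hx
          have hne : done ≠ [] := by intro h; subst h; simp at hx
          have hlast := (List.getLast_mem hne)
          have hxl : x ≤ done.getLast hne := by
            have hsd : done.Pairwise (· ≤ ·) := (List.pairwise_append.1 (hsplit ▸ hs)).1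
            exact sorted_le_last hsd hne x hx
          have hcap : sumCap bs (done.getLast hne) ≤ M := hinv _ hlast
          have heq : sumCap bs (done.getLast hne) = done.sum + k * (done.getLast hne) := by
            apply hsum_at
            · intro z hz
              have hsd : done.Pairwise (· ≤ ·) := (List.pairwise_append.1 (hsplit ▸ hs)).1
              exact sorted_le_last hsd hne z hz
            · intro z hz
              exact le_trans (hdone_le_b _ hlast) (hb_le_rest z hz)
          have : done.getLast hne ≤ t := by
            rw [ht]
            refine (PySem.Int.le_floordiv_iff_mul_le hkpos).2 ?_
            have hcm := mul_comm k (done.getLast hne)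
            omega
          omega
        have hft1 : M < sumCap bs (t + 1) := by
          have heq : sumCap bs (t + 1) = done.sum + k * (t + 1) := by
            apply hsum_at
            · intro z hz; have := hdone_le_t z hz; omega
            · intro z hz; have := hb_le_rest z hz; omega
          have hlt1 : M - done.sum < (t + 1) * k := by
            rw [ht]
            exact (PySem.Int.floordiv_lt_iff_lt_mul hkpos).1 (by omega)
          have hcm := mul_comm k (t + 1)
          omega
        refine ⟨by rw [hRval]; split <;> omega, ?_, ?_, ?_⟩
        · have hbmx := hmx b hb_mem
          rw [hRval]
          split
          · exact le_trans (by omega) (le_max_left mx 0)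
          · exact le_max_right mx 0
        · rw [hRval]
          split
          · right
            have heq : sumCap bs t = done.sum + k * t := by
              apply hsum_at
              · exact hdone_le_t
              · intro z hz; have := hb_le_rest z hz; omega
            have hle : t * k ≤ M - done.sum := by
              conv_lhs => rw [ht]
              exact (PySem.Int.le_floordiv_iff_mul_le hkpos).1 le_rfl
            have hcm := mul_comm k t
            omega
          · left; rfl
        · intro c hc _
          have hc' : t + 1 ≤ c := by rw [hRval] at hc; split at hc <;> omega
          exact lt_of_lt_of_le hft1 (sumCap_mono bs hc')
      · intro h; simp at h
    · simp only [htrig, if_false]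
      have hnew : ∀ y ∈ done ++ [b], sumCap bs y ≤ M := by
        intro y hy
        rcases List.mem_append.1 hy with h | h
        · exact hinv y h
        · have hyb : y = b := by simpa using h
          subst hyb
          have heq : sumCap bs y = done.sum + ((y :: rest').length : Int) * y :=
            hsum_at y hdone_le_b hb_le_rest
          rw [heq]; rw [hlen] at htrig; omega
      have := ih (done ++ [b]) (by simp [hsplit]) hnew
      have harg1 : ((done ++ [b]).length : Int) = (done.length : Int) + 1 := by
        simp
      have harg2 : (done ++ [b]).sum = done.sum + b := by simp
      rw [harg1, harg2] at this
      exact this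

-- ===== MAIN PROOF =====
theorem Chr_perm {xs ys : List Int} (h : xs.Perm ys) {M mx R : Int}
    (hc : Chr xs M mx R) : Chr ys M mx R := by
  obtain ⟨p, q, d, f⟩ := hc
  refine ⟨p, q, ?_, fun c hc1 hc2 => ?_⟩
  · rcases d with h' | h'
    · exact Or.inl h'
    · exact Or.inr (by rw [← sumCap_perm h]; exact h')
  · rw [← sumCap_perm h]; exact f c hc1 hc2

theorem solution_alt_chr (budgets : List Int) (M mx : Int) (hne : budgets ≠ [])
    (hmem : mx ∈ budgets) (hmax : ∀ y ∈ budgets, y ≤ mx) :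
    Chr budgets M mx (solution_alt budgets M) := by
  unfold solution_alt
  set bs := PySem.List.sorted budgets (fun x => x) false with hbs
  have hperm : bs.Perm budgets := PySem.List.sorted_perm budgets (fun x => x) false
  have hbsne : bs ≠ [] := by
    intro h
    exact hne (List.Perm.eq_nil (h ▸ hperm.symm))
  have hs : bs.Pairwise (· ≤ ·) := by
    simpa using PySem.List.sorted_pairwise budgets (fun x => x)
  have hmx' : ∀ y ∈ bs, y ≤ mx := fun y hy => hmax y (hperm.mem_iff.1 hy)
  have hspec := bGo_spec bs M mx hs hmx' bs [] (by simp) (by simp)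
  simp only [List.length_nil, Int.natCast_zero, List.sum_nil] at hspec
  rcases hgo : bGo M (bs.length : Int) bs 0 0 with _ | R
  · -- loop completed: answer is max(bs[-1], 0) = max mx 0
    simp only [hgo]
    have hinv := hspec.2 hgo
    have hlast : bs.getLast hbsne = mx := by
      have h1 : bs.getLast hbsne ≤ mx := hmx' _ (List.getLast_mem hbsne)
      have h2 : mx ≤ bs.getLast hbsne :=
        sorted_le_last hs hbsne mx (hperm.mem_iff.2 hmem)
      omega
    have hget : (PySem.List.pyGet? bs (-1)).getD 0 = mx := by
      rw [PySem.List.pyGet?_neg_one, List.getLast?_eq_some_getLast hbsne, Option.getD_some, hlast]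
    simp only [hget]
    refine ⟨le_max_right mx 0, le_rfl, ?_, fun c hc1 hc2 => ?_⟩
    · by_cases h' : 0 ≤ mx
      · right
        rw [max_eq_left h', ← sumCap_perm hperm]
        exact hinv mx (hperm.mem_iff.2 hmem)
      · left; exact max_eq_right (by omega)
    · exfalso
      have := le_max_left mx 0
      omega
  · simp only [hgo]
    exact Chr_perm hperm (hspec.1 R hgo)

theorem solution_chr (budgets : List Int) (M mx : Int)
    (hmx : PySem.List.max? budgets (fun x => x) = some mx) :
    Chr budgets M mx (solution budgets M) := by
  unfold solution
  rw [hmx]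
  show Chr budgets M mx (aLoop budgets M 0 mx 0)
  rw [aLoop_eq_gl budgets M (mx + 1 - 0).toNat 0 mx 0 rfl]
  exact gl_char budgets M (mx + 1).toNat mx rfl

-- ===== VERDICT (by name: the statement is the Claim_ definition above) =====
theorem solution_spec : Claim_equal_solution := by
  intro budgets M _hdom hpre
  unfold Spec_solution
  unfold Pre_solution at hpre
  rcases hmx : PySem.List.max? budgets (fun x => x) with _ | mx
  · exact absurd ((PySem.List.max?_eq_none_iff _ _).1 hmx) hpre
  · have hmem : mx ∈ budgets := PySem.List.max?_mem hmx
    have hmax : ∀ y ∈ budgets, y ≤ mx := PySem.List.max?_isMax hmx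
    exact Chr_unique (solution_chr budgets M mx hmx)
      (solution_alt_chr budgets M mx hpre hmem hmax)
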